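-- pv_equiv track=rewrite | github.com/maxwshen/inDelphi-model | inDelphi.py | __find_microhomologies
-- ===== SOURCE A (Python) =====
-- def __find_microhomologies(left, right):
--   start_idx = max(len(right) - len(left), 0)
--   mhs = []
--   mh = [start_idx]
--   for idx in range(min(len(right), len(left))):
--     if left[idx] == right[start_idx + idx]:
--       mh.append(start_idx + idx + 1)
--     else:
--       mhs.append(mh)
--       mh = [start_idx + idx +1]
--   mhs.append(mh)
--   return mhs
-- ===== SOURCE B (Python) =====
-- def __find_microhomologies(left, right):
--   start_idx = max(len(right) - len(left), 0)
--   n = min(len(left), len(right))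
--   values = list(range(start_idx, start_idx + n + 1))
--   breaks = [i for i in range(n) if left[i] != right[start_idx + i]]
--   groups = []
--   prev = 0
--   for b in breaks:
--     groups.append(values[prev:b + 1])
--     prev = b + 1
--   groups.append(values[prev:])
--   return groups
-- ===== Notes on version B (the rewrite author's own statement) =====
-- stated objective: alternative
-- what changed: Replaces the accumulate-and-flush scan (growing the current group element by element and flushing it on mismatch) by a splits-at-boundaries decomposition: build the full contiguous index list once, collect mismatch positions as break points, then cut the list into groups at those breaks.
import Mathlib
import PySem

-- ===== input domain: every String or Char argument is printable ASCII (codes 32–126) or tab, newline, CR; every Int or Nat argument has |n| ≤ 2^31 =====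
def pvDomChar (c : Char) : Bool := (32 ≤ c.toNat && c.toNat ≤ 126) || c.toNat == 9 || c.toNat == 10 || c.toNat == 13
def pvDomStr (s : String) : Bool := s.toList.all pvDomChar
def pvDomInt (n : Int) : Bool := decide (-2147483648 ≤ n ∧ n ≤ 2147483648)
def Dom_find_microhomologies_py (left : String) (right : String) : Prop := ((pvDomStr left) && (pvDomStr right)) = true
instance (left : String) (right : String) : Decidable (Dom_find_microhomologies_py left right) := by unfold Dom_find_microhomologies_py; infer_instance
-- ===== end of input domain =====

-- B rebuilds the groups by a splits-at-boundaries decomposition (full index list cut at mismatch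
-- positions) instead of A's accumulate-and-flush scan; objective: alternative (same cost).

-- ===== PORT A =====
def find_microhomologies_py (left : String) (right : String) : List (List Int) :=
  let start_idx : Int := max (PySem.Str.len right - PySem.Str.len left) 0
  let res := (PySem.List.pyRange 0 (min (PySem.Str.len right) (PySem.Str.len left)) 1).foldl
    (fun (st : List (List Int) × List Int) idx =>
      if PySem.Str.pyGet? left idx == PySem.Str.pyGet? right (start_idx + idx) then
        (st.1, st.2 ++ [start_idx + idx + 1])
      else
        (st.1 ++ [st.2], [start_idx + idx + 1]))
    ([], [start_idx])
  res.1 ++ [res.2]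

-- ===== PORT B =====
def find_microhomologies_py_alt (left : String) (right : String) : List (List Int) :=
  let start_idx : Int := max (PySem.Str.len right - PySem.Str.len left) 0
  let n : Int := min (PySem.Str.len left) (PySem.Str.len right)
  let values := PySem.List.pyRange start_idx (start_idx + n + 1) 1
  let breaks := (PySem.List.pyRange 0 n 1).filter
    (fun i => !(PySem.Str.pyGet? left i == PySem.Str.pyGet? right (start_idx + i)))
  let res := breaks.foldl
    (fun (st : List (List Int) × Int) b =>
      (st.1 ++ [PySem.List.slice values (some st.2) (some (b + 1))], b + 1))
    ([], 0)
  res.1 ++ [PySem.List.slice values (some res.2) none]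

-- ===== PRECONDITION & SPEC =====
def Spec_find_microhomologies_py (left : String) (right : String) (out : List (List Int)) : Prop := out = find_microhomologies_py_alt left right
instance (left : String) (right : String) (out : List (List Int)) : Decidable (Spec_find_microhomologies_py left right out) := by unfold Spec_find_microhomologies_py; infer_instance

-- ===== CLAIM (what is proved, stated in full; the proofs are below) =====
def Claim_equal_find_microhomologies_py : Prop := ∀ (left : String) (right : String), Dom_find_microhomologies_py left right → Spec_find_microhomologies_py left right (find_microhomologies_py left right)

-- ===== LEMMAS AND PROOFS =====

-- ===== LEMMAS AND PROOFS =====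

-- abbreviations for the quantities both ports share (proof-only helpers)
def pvS (left right : String) : Int := max (PySem.Str.len right - PySem.Str.len left) 0
def pvN (left right : String) : Int := min (PySem.Str.len left) (PySem.Str.len right)
def pvM (left right : String) (i : Int) : Bool :=
  PySem.Str.pyGet? left i == PySem.Str.pyGet? right (pvS left right + i)
def pvVals (left right : String) : List Int :=
  PySem.List.pyRange (pvS left right) (pvS left right + pvN left right + 1) 1
def pvBodyA (left right : String) (st : List (List Int) × List Int) (idx : Int) :
    List (List Int) × List Int :=
  if pvM left right idx then (st.1, st.2 ++ [pvS left right + idx + 1])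
  else (st.1 ++ [st.2], [pvS left right + idx + 1])
def pvBodyB (left right : String) (st : List (List Int) × Int) (b : Int) :
    List (List Int) × Int :=
  (st.1 ++ [PySem.List.slice (pvVals left right) (some st.2) (some (b + 1))], b + 1)

lemma pvN_nonneg (left right : String) : 0 ≤ pvN left right := by
  simp [pvN, PySem.Str.len]

lemma pvVals_length (left right : String) :
    (pvVals left right).length = (pvN left right).toNat + 1 := by
  have h := pvN_nonneg left right
  simp [pvVals, PySem.List.length_pyRange_one]
  omega

lemma pvVals_get (left right : String) (j : Nat) (h : j < (pvVals left right).length) :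
    (pvVals left right)[j] = pvS left right + j := by
  simp [pvVals] at h ⊢

-- generic slice facts on natural bounds
lemma pv_slice_snoc (xs : List Int) (p k : Nat) (h1 : p ≤ k + 1) (h2 : k + 1 < xs.length) :
    PySem.List.slice xs (some (p:Int)) (some ((k:Int)+2)) =
      PySem.List.slice xs (some (p:Int)) (some ((k:Int)+1)) ++ [xs[k+1]] := by
  have e2 : ((k:Int)+2) = ((k+2 : Nat) : Int) := by push_cast; ring
  have e1 : ((k:Int)+1) = ((k+1 : Nat) : Int) := by push_cast; ring
  rw [e1, e2, PySem.List.slice_natCast, PySem.List.slice_natCast]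
  have hp : k + 2 - p = (k + 1 - p) + 1 := by omega
  rw [hp, List.take_add_one]
  congr 1
  have hd : (xs.drop p)[k+1-p]? = some xs[k+1] := by
    rw [List.getElem?_drop]
    have hpk : p + (k + 1 - p) = k + 1 := by omega
    rw [hpk, List.getElem?_eq_getElem h2]
  simp [hd]

lemma pv_slice_single (xs : List Int) (q : Nat) (h : q < xs.length) :
    PySem.List.slice xs (some (q:Int)) (some ((q:Int)+1)) = [xs[q]] := by
  have e1 : ((q:Int)+1) = ((q+1 : Nat) : Int) := by push_cast; ring
  rw [e1, PySem.List.slice_natCast]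
  have h2 : q + 1 - q = 1 := by omega
  rw [h2, List.take_one]
  simp [List.head?_drop, List.getElem?_eq_getElem h]

lemma pv_slice_full (xs : List Int) (p b : Nat) (h : xs.length ≤ b) :
    PySem.List.slice xs (some (p:Int)) (some (b:Int)) = xs.drop p := by
  rw [PySem.List.slice_natCast]
  exact List.take_of_length_le (by simp; omega)

-- the joint invariant: after processing indices 0..k-1, A's (mhs, mh) state equals
-- (B's groups so far, values[prev : k+1])
lemma pv_inv (left right : String) (k : Nat) (hk : (k:Int) ≤ pvN left right) :
    ∃ p : Nat, p ≤ k ∧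
      (((PySem.List.pyRange 0 (k:Int) 1).filter (fun i => !(pvM left right i))).foldl
          (pvBodyB left right) ([], 0)).2 = (p:Int) ∧
      (PySem.List.pyRange 0 (k:Int) 1).foldl (pvBodyA left right) ([], [pvS left right]) =
        ((((PySem.List.pyRange 0 (k:Int) 1).filter (fun i => !(pvM left right i))).foldl
            (pvBodyB left right) ([], 0)).1,
         PySem.List.slice (pvVals left right) (some (p:Int)) (some ((k:Int)+1))) := by
  induction k with
  | zero =>
    refine ⟨0, le_refl _, ?_, ?_⟩
    · simp [PySem.List.pyRange_one_eq_nil]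
    · have hlen : 0 < (pvVals left right).length := by rw [pvVals_length]; omega
      have hs := pv_slice_single (pvVals left right) 0 hlen
      have hv := pvVals_get left right 0 hlen
      simp only [Nat.cast_zero, zero_add] at hs
      simp only [Nat.cast_zero, add_zero] at hv
      simp only [Nat.cast_zero, zero_add, PySem.List.pyRange_one_eq_nil (le_refl 0),
        List.filter_nil, List.foldl_nil, hs, hv]
  | succ k ih =>
    have hk' : (k:Int) ≤ pvN left right := by push_cast at hk ⊢; omega
    obtain ⟨p, hp, hB2, hA⟩ := ih hk'
    have hsplit : PySem.List.pyRange 0 ((k+1 : Nat):Int) 1 =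
        PySem.List.pyRange 0 (k:Int) 1 ++ [(k:Int)] := by
      have e : ((k+1 : Nat):Int) = (k:Int) + 1 := by push_cast; ring
      rw [e, PySem.List.pyRange_one_succ_right (by positivity)]
    have hklen : k + 1 < (pvVals left right).length := by
      rw [pvVals_length]; push_cast at hk; omega
    by_cases hm : pvM left right (k:Int)
    · -- match: B unchanged, A appends s+k+1 to the current group
      refine ⟨p, by omega, ?_, ?_⟩
      · rw [hsplit, List.filter_append]
        simp [hm, hB2]
      · rw [hsplit, List.filter_append, List.foldl_append, hA]
        simp only [List.foldl_cons, List.foldl_nil, hm, Bool.not_true, List.filter_cons,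
          List.filter_nil, Bool.false_eq_true, if_false, List.append_nil]
        have hsnoc := pv_slice_snoc (pvVals left right) p k (by omega) hklen
        have hv := pvVals_get left right (k+1) hklen
        have ecast : (((k+1:Nat)):Int) + 1 = (k:Int) + 2 := by push_cast; ring
        rw [ecast, hsnoc, hv]
        simp only [pvBodyA, hm, if_true]
        rw [add_assoc]
        norm_cast
    · -- mismatch: A flushes the group, B records the break
      refine ⟨k+1, le_refl _, ?_, ?_⟩
      · rw [hsplit, List.filter_append]
        simp [hm, pvBodyB]
      · rw [hsplit, List.filter_append, List.foldl_append, hA]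
        have hsing := pv_slice_single (pvVals left right) (k+1) hklen
        have hv := pvVals_get left right (k+1) hklen
        have e1 : ((k+1:Nat):Int) = (k:Int) + 1 := by push_cast; ring
        rw [e1] at hsing hv
        simp only [List.filter_cons, List.filter_nil, hm, Bool.not_false, if_true,
          List.foldl_append, List.foldl_cons, List.foldl_nil, pvBodyA, pvBodyB,
          Bool.false_eq_true, if_false, hB2, e1]
        rw [hsing, hv, add_assoc]
  -- end pv_inv

-- the two ports restated through the helpers
lemma portA_eq (left right : String) :
    find_microhomologies_py left right =
      (let r := (PySem.List.pyRange 0 (pvN left right) 1).foldl (pvBodyA left right)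
          ([], [pvS left right]);
       r.1 ++ [r.2]) := by
  simp only [find_microhomologies_py]
  have hA : (fun (st : List (List Int) × List Int) idx =>
      if PySem.Str.pyGet? left idx ==
          PySem.Str.pyGet? right (max (PySem.Str.len right - PySem.Str.len left) 0 + idx) then
        (st.1, st.2 ++ [max (PySem.Str.len right - PySem.Str.len left) 0 + idx + 1])
      else
        (st.1 ++ [st.2], [max (PySem.Str.len right - PySem.Str.len left) 0 + idx + 1]))
      = pvBodyA left right := by
    funext st idx; simp only [pvBodyA, pvM, pvS]
  rw [hA, show min (PySem.Str.len right) (PySem.Str.len left) = pvN left right from min_comm _ _]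
  rfl

lemma portB_eq (left right : String) :
    find_microhomologies_py_alt left right =
      (let r := ((PySem.List.pyRange 0 (pvN left right) 1).filter
            (fun i => !(pvM left right i))).foldl (pvBodyB left right) ([], 0);
       r.1 ++ [PySem.List.slice (pvVals left right) (some r.2) none]) := by
  simp only [find_microhomologies_py_alt]
  have hF : (fun i =>
      !(PySem.Str.pyGet? left i ==
          PySem.Str.pyGet? right (max (PySem.Str.len right - PySem.Str.len left) 0 + i)))
      = (fun i => !(pvM left right i)) := by
    funext i; simp only [pvM, pvS]
  have hB : (fun (st : List (List Int) × Int) b =>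
      (st.1 ++ [PySem.List.slice
          (PySem.List.pyRange (max (PySem.Str.len right - PySem.Str.len left) 0)
            (max (PySem.Str.len right - PySem.Str.len left) 0 +
              min (PySem.Str.len left) (PySem.Str.len right) + 1) 1)
          (some st.2) (some (b + 1))], b + 1))
      = pvBodyB left right := by
    funext st b; simp only [pvBodyB, pvVals, pvS, pvN]
  rw [hF, hB]
  rfl

-- ===== VERDICT (by name: the statement is the Claim_ definition above) =====
theorem find_microhomologies_py_spec : Claim_equal_find_microhomologies_py := by
  intro left right _
  unfold Spec_find_microhomologies_py
  rw [portA_eq, portB_eq]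
  have h0 := pvN_nonneg left right
  have hcast : ((pvN left right).toNat : Int) = pvN left right := Int.toNat_of_nonneg h0
  obtain ⟨p, hp, hB2, hA⟩ := pv_inv left right (pvN left right).toNat (by omega)
  rw [hcast] at hB2 hA
  simp only [hA, hB2]
  congr 1
  have hfull := pv_slice_full (pvVals left right) p ((pvN left right).toNat + 1)
    (by rw [pvVals_length])
  rw [show (pvN left right) + 1 = (((pvN left right).toNat + 1 : Nat):Int) by omega, hfull]
  rw [PySem.List.slice_from_natCast]
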